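-- pv_equiv track=rewrite | github.com/FINNxFASTEST/ai-screen-ocr-translator | app/hotkeys.py | tk_held_keysyms_to_modifier_tokens
-- ===== SOURCE A (Python) =====
-- def normalize_modifier_keysym_for_held(raw: str) -> str | None:
--     """Return a lowercase stable id for Tk modifier tracking, or None.
--
--     Windows Tk sometimes uses different casings (`control_l`), names (`ISO_Left_Control`),
--     or synonyms (`Ctrl_L`). Excluded keys must not collide with real keysyms.
--     """
--
--     kl = (raw or "").strip().lower()
--     if not kl:
--         return None
--
--     alias_map: dict[str, str] = {
--         "ctrl_l": "control_l",
--         "ctrl_r": "control_r",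
--         "iso_left_control": "control_l",
--         "iso_right_control": "control_r",
--         "apple_l": "meta_l",
--         "apple_r": "meta_r",
--     }
--     kl = alias_map.get(kl, kl)
--
--     if kl.startswith(("control_", "shift_", "alt_", "win_", "meta_", "super_")):
--         return kl
--     if kl in (
--         "shift_l",
--         "shift_r",
--         "control_l",
--         "control_r",
--         "alt_l",
--         "alt_r",
--         "win_l",
--         "win_r",
--         "meta_l",
--         "meta_r",
--         "super_l",
--         "super_r",
--     ):
--         return kl
--     if kl.startswith("iso_") and "control" in kl:
--         return "control_l"
--     return None
--
-- def tk_held_keysyms_to_modifier_tokens(held: set[str]) -> list[str]: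
--     """Map raw Tk modifier keysyms (still held) to ordered <ctrl>/<shift>/<alt>/<win> tokens."""
--     canon: list[str] = []
--     for k in held:
--         n = normalize_modifier_keysym_for_held(k)
--         if n:
--             canon.append(n)
--     has_ctrl = any(c.startswith("control_") for c in canon)
--     has_shift = any(c.startswith("shift_") for c in canon)
--     has_alt = any(c.startswith("alt_") for c in canon)
--     has_win = any(
--         c in ("win_l", "win_r", "meta_l", "meta_r", "super_l", "super_r")
--         or c.startswith("win_")
--         or c.startswith("meta_")
--         or c.startswith("super_")
--         for c in canon
--     )
--     out: list[str] = []
--     if has_ctrl: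
--         out.append("<ctrl>")
--     if has_shift:
--         out.append("<shift>")
--     if has_alt:
--         out.append("<alt>")
--     if has_win:
--         out.append("<win>")
--     return out
-- ===== SOURCE B (Python) =====
-- # B: single pass over `held` classifying each keysym directly into four presence
-- # flags (no intermediate canonical list, no four any() scans).
--
-- _ALIASES = {
--     "ctrl_l": "control_l",
--     "ctrl_r": "control_r",
--     "iso_left_control": "control_l",
--     "iso_right_control": "control_r",
--     "apple_l": "meta_l",
--     "apple_r": "meta_r",
-- }
--
--
-- def tk_held_keysyms_to_modifier_tokens(held):
--     ctrl = shift = alt = win = False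
--     for k in held:
--         s = (k or "").strip().lower()
--         s = _ALIASES.get(s, s)
--         if s.startswith("control_") or (s.startswith("iso_") and "control" in s):
--             ctrl = True
--         elif s.startswith("shift_"):
--             shift = True
--         elif s.startswith("alt_"):
--             alt = True
--         elif s.startswith("win_") or s.startswith("meta_") or s.startswith("super_"):
--             win = True
--     out = []
--     if ctrl:
--         out.append("<ctrl>")
--     if shift:
--         out.append("<shift>")
--     if alt:
--         out.append("<alt>")
--     if win:
--         out.append("<win>")
--     return out
-- ===== Notes on version B (the rewrite author's own statement) =====
-- stated objective: simpler
-- what changed: B makes a single pass over held, classifying each keysym directly into four presence flags, instead of building an intermediate canonical list and running four separate any() scans over it.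
import Mathlib
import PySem

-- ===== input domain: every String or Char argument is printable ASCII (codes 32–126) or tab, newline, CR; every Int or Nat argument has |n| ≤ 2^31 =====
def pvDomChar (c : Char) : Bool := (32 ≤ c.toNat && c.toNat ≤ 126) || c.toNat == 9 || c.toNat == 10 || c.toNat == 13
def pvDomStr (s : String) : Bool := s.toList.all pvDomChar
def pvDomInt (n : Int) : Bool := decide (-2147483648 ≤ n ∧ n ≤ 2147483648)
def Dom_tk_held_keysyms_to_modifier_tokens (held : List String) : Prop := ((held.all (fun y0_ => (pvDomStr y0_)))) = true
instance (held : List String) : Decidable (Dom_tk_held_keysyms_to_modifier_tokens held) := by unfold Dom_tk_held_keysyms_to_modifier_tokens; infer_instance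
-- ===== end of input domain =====

-- B replaces A's intermediate canonical list and four any() scans by one pass that
-- classifies each keysym directly into four presence flags (objective: simpler).

-- ===== PORT A =====
def pvAliasMapA : PySem.Dict String String :=
  PySem.Dict.ofList
    [("ctrl_l", "control_l"), ("ctrl_r", "control_r"),
     ("iso_left_control", "control_l"), ("iso_right_control", "control_r"),
     ("apple_l", "meta_l"), ("apple_r", "meta_r")]

def normalize_modifier_keysym_for_held (raw : String) : Option String :=
  let kl := PySem.Str.lower (PySem.Str.strip raw)   -- (raw or "") is `raw` itself for strings
  if kl = "" then none
  else
    let kl := pvAliasMapA.getD kl kl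
    if PySem.Str.startswith kl "control_" || PySem.Str.startswith kl "shift_" ||
       PySem.Str.startswith kl "alt_" || PySem.Str.startswith kl "win_" ||
       PySem.Str.startswith kl "meta_" || PySem.Str.startswith kl "super_" then
      some kl
    else if ["shift_l", "shift_r", "control_l", "control_r", "alt_l", "alt_r",
             "win_l", "win_r", "meta_l", "meta_r", "super_l", "super_r"].contains kl then
      some kl
    else if PySem.Str.startswith kl "iso_" && PySem.Str.isIn "control" kl then
      some "control_l"
    else none

def tk_held_keysyms_to_modifier_tokens (held : List String) : List String :=
  let canon : List String := held.foldl (fun acc k =>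
    match normalize_modifier_keysym_for_held k with
    | some n => if n = "" then acc else acc ++ [n]   -- `if n:` truthiness on str
    | none => acc) []
  let has_ctrl := canon.any (fun c => PySem.Str.startswith c "control_")
  let has_shift := canon.any (fun c => PySem.Str.startswith c "shift_")
  let has_alt := canon.any (fun c => PySem.Str.startswith c "alt_")
  let has_win := canon.any (fun c =>
    ["win_l", "win_r", "meta_l", "meta_r", "super_l", "super_r"].contains c ||
    PySem.Str.startswith c "win_" || PySem.Str.startswith c "meta_" ||
    PySem.Str.startswith c "super_")
  let out : List String := []
  let out := if has_ctrl then out ++ ["<ctrl>"] else out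
  let out := if has_shift then out ++ ["<shift>"] else out
  let out := if has_alt then out ++ ["<alt>"] else out
  let out := if has_win then out ++ ["<win>"] else out
  out

-- ===== PORT B =====  (shares the alias-table constant pvAliasMapA with port A)
def pvStepB (st : Bool × Bool × Bool × Bool) (k : String) : Bool × Bool × Bool × Bool :=
  let s := PySem.Str.lower (PySem.Str.strip k)
  let s := pvAliasMapA.getD s s
  if PySem.Str.startswith s "control_" ||
     (PySem.Str.startswith s "iso_" && PySem.Str.isIn "control" s) then
    (true, st.2.1, st.2.2.1, st.2.2.2)
  else if PySem.Str.startswith s "shift_" then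
    (st.1, true, st.2.2.1, st.2.2.2)
  else if PySem.Str.startswith s "alt_" then
    (st.1, st.2.1, true, st.2.2.2)
  else if PySem.Str.startswith s "win_" || PySem.Str.startswith s "meta_" ||
          PySem.Str.startswith s "super_" then
    (st.1, st.2.1, st.2.2.1, true)
  else st

def tk_held_keysyms_to_modifier_tokens_alt (held : List String) : List String :=
  let st := held.foldl pvStepB (false, false, false, false)
  (if st.1 then ["<ctrl>"] else []) ++ (if st.2.1 then ["<shift>"] else []) ++
  (if st.2.2.1 then ["<alt>"] else []) ++ (if st.2.2.2 then ["<win>"] else [])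

-- ===== PRECONDITION & SPEC =====
def Spec_tk_held_keysyms_to_modifier_tokens (held : List String) (out : List String) : Prop := out = tk_held_keysyms_to_modifier_tokens_alt held
instance (held : List String) (out : List String) : Decidable (Spec_tk_held_keysyms_to_modifier_tokens held out) := by unfold Spec_tk_held_keysyms_to_modifier_tokens; infer_instance

-- ===== CLAIM (what is proved, stated in full; the proofs are below) =====
def Claim_equal_tk_held_keysyms_to_modifier_tokens : Prop := ∀ (held : List String), Dom_tk_held_keysyms_to_modifier_tokens held → Spec_tk_held_keysyms_to_modifier_tokens held (tk_held_keysyms_to_modifier_tokens held)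

-- ===== LEMMAS AND PROOFS =====

-- per-key canonical value A appends to `canon` (none if normalize gives None or "")
def pvG (k : String) : Option String :=
  (normalize_modifier_keysym_for_held k).bind (fun n => if n = "" then none else some n)

-- the keysym after strip/lower/alias (shared shape of both ports' per-key work)
def pvKey (k : String) : String :=
  let s := PySem.Str.lower (PySem.Str.strip k)
  pvAliasMapA.getD s s

-- B's four branch conditions, with the elif exclusions made explicit
def pvCondC (s : String) : Bool :=
  PySem.Str.startswith s "control_" ||
    (PySem.Str.startswith s "iso_" && PySem.Str.isIn "control" s)

def pvCondS (s : String) : Bool := !pvCondC s && PySem.Str.startswith s "shift_"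

def pvCondA (s : String) : Bool :=
  !pvCondC s && !PySem.Str.startswith s "shift_" && PySem.Str.startswith s "alt_"

def pvCondW (s : String) : Bool :=
  !pvCondC s && !PySem.Str.startswith s "shift_" && !PySem.Str.startswith s "alt_" &&
    (PySem.Str.startswith s "win_" || PySem.Str.startswith s "meta_" ||
      PySem.Str.startswith s "super_")

-- the tail of normalize after the emptiness test, as a function of the aliased keysym
def pvRest (t : String) : Option String :=
  if PySem.Str.startswith t "control_" || PySem.Str.startswith t "shift_" ||
     PySem.Str.startswith t "alt_" || PySem.Str.startswith t "win_" ||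
     PySem.Str.startswith t "meta_" || PySem.Str.startswith t "super_" then
    some t
  else if ["shift_l", "shift_r", "control_l", "control_r", "alt_l", "alt_r",
           "win_l", "win_r", "meta_l", "meta_r", "super_l", "super_r"].contains t then
    some t
  else if PySem.Str.startswith t "iso_" && PySem.Str.isIn "control" t then
    some "control_l"
  else none

lemma pv_normalize (k : String) :
    normalize_modifier_keysym_for_held k =
      if PySem.Str.lower (PySem.Str.strip k) = "" then none else pvRest (pvKey k) := rfl

-- two prefixes of the same string, neither a prefix of the other, cannot both hold
lemma pv_excl (p q s : String)
    (h : (!(decide (p.toList <+: q.toList)) && !(decide (q.toList <+: p.toList))) = true)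
    (hp : PySem.Str.startswith s p = true) : PySem.Str.startswith s q = false := by
  cases hq : PySem.Str.startswith s q
  · rfl
  · exfalso
    simp only [Bool.and_eq_true, Bool.not_eq_true', decide_eq_false_iff_not] at h
    rw [PySem.Str.startswith_eq] at hp hq
    have hp' := (PySem.Chars.startswith_iff _ _).mp hp
    have hq' := (PySem.Chars.startswith_iff _ _).mp hq
    rcases Nat.le_total p.toList.length q.toList.length with hle | hle
    · exact h.1 (List.prefix_of_prefix_length_le hp' hq' hle)
    · exact h.2 (List.prefix_of_prefix_length_le hq' hp' hle)

lemma pv_not_mem_lits_of_iso (t : String) (hI : PySem.Str.startswith t "iso_" = true) :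
    (["shift_l", "shift_r", "control_l", "control_r", "alt_l", "alt_r",
      "win_l", "win_r", "meta_l", "meta_r", "super_l", "super_r"]).contains t = false := by
  cases hmem : (["shift_l", "shift_r", "control_l", "control_r", "alt_l", "alt_r",
      "win_l", "win_r", "meta_l", "meta_r", "super_l", "super_r"]).contains t
  · rfl
  · exfalso
    have hm := List.contains_iff_mem.mp hmem
    simp only [List.mem_cons, List.not_mem_nil, or_false] at hm
    rcases hm with h|h|h|h|h|h|h|h|h|h|h|h <;> subst h <;> revert hI <;> decide

lemma pv_mem6_startswith (t : String)
    (hmem : (["win_l", "win_r", "meta_l", "meta_r", "super_l", "super_r"]).contains t = true) :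
    (PySem.Str.startswith t "win_" || PySem.Str.startswith t "meta_" ||
      PySem.Str.startswith t "super_") = true := by
  have hm := List.contains_iff_mem.mp hmem
  simp only [List.mem_cons, List.not_mem_nil, or_false] at hm
  rcases hm with h|h|h|h|h|h <;> subst h <;> decide

-- ---- pointwise: A's per-key contribution to each flag equals B's branch condition ----

lemma pv_core_ctrl (t : String) :
    (((pvRest t).bind (fun n => if n = "" then none else some n)).map
        (fun c => PySem.Str.startswith c "control_")).getD false = pvCondC t := by
  by_cases ht0 : t = ""
  · subst ht0; decide
  · by_cases hC : PySem.Str.startswith t "control_" = true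
    · simp at hC
      simp [pvRest, pvCondC, hC, ht0]
    · rw [Bool.not_eq_true] at hC
      by_cases hI : PySem.Str.startswith t "iso_" = true
      · have hS := pv_excl "iso_" "shift_" t (by decide) hI
        have hA := pv_excl "iso_" "alt_" t (by decide) hI
        have hW := pv_excl "iso_" "win_" t (by decide) hI
        have hM := pv_excl "iso_" "meta_" t (by decide) hI
        have hP := pv_excl "iso_" "super_" t (by decide) hI
        have hmem := pv_not_mem_lits_of_iso t hI
        simp at hC hS hA hW hM hP hI hmem
        cases hK : PySem.Str.isIn "control" t <;> simp at hK <;>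
          simp [pvRest, pvCondC, hC, hS, hA, hW, hM, hP, hI, hK, hmem, ht0]
        all_goals decide
      · rw [Bool.not_eq_true] at hI
        simp only [pvRest, pvCondC]
        simp at hC hI
        split_ifs <;> simp_all <;> decide

lemma pv_core_shift (t : String) :
    (((pvRest t).bind (fun n => if n = "" then none else some n)).map
        (fun c => PySem.Str.startswith c "shift_")).getD false = pvCondS t := by
  by_cases ht0 : t = ""
  · subst ht0; decide
  · by_cases hS : PySem.Str.startswith t "shift_" = true
    · have hC := pv_excl "shift_" "control_" t (by decide) hS
      have hI := pv_excl "shift_" "iso_" t (by decide) hS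
      simp at hS hC hI
      simp [pvRest, pvCondS, pvCondC, hS, hC, hI, ht0]
    · rw [Bool.not_eq_true] at hS
      simp only [pvRest, pvCondS, pvCondC]
      simp at hS
      split_ifs <;> simp_all <;> decide

lemma pv_core_alt (t : String) :
    (((pvRest t).bind (fun n => if n = "" then none else some n)).map
        (fun c => PySem.Str.startswith c "alt_")).getD false = pvCondA t := by
  by_cases ht0 : t = ""
  · subst ht0; decide
  · by_cases hA : PySem.Str.startswith t "alt_" = true
    · have hC := pv_excl "alt_" "control_" t (by decide) hA
      have hI := pv_excl "alt_" "iso_" t (by decide) hA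
      have hS := pv_excl "alt_" "shift_" t (by decide) hA
      simp at hA hC hI hS
      simp [pvRest, pvCondA, pvCondC, hA, hC, hI, hS, ht0]
    · rw [Bool.not_eq_true] at hA
      simp only [pvRest, pvCondA, pvCondC]
      simp at hA
      split_ifs <;> simp_all <;> decide

lemma pv_core_win (t : String) :
    (((pvRest t).bind (fun n => if n = "" then none else some n)).map
        (fun c =>
          ["win_l", "win_r", "meta_l", "meta_r", "super_l", "super_r"].contains c ||
          PySem.Str.startswith c "win_" || PySem.Str.startswith c "meta_" ||
          PySem.Str.startswith c "super_")).getD false = pvCondW t := by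
  by_cases ht0 : t = ""
  · subst ht0; decide
  · by_cases hW : PySem.Str.startswith t "win_" = true
    · have hC := pv_excl "win_" "control_" t (by decide) hW
      have hI := pv_excl "win_" "iso_" t (by decide) hW
      have hS := pv_excl "win_" "shift_" t (by decide) hW
      have hA := pv_excl "win_" "alt_" t (by decide) hW
      simp at hW hC hI hS hA
      simp [pvRest, pvCondW, pvCondC, hW, hC, hI, hS, hA, ht0]
    · rw [Bool.not_eq_true] at hW
      by_cases hM : PySem.Str.startswith t "meta_" = true
      · have hC := pv_excl "meta_" "control_" t (by decide) hM
        have hI := pv_excl "meta_" "iso_" t (by decide) hM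
        have hS := pv_excl "meta_" "shift_" t (by decide) hM
        have hA := pv_excl "meta_" "alt_" t (by decide) hM
        simp at hM hC hI hS hA
        simp [pvRest, pvCondW, pvCondC, hM, hC, hI, hS, hA, ht0]
      · rw [Bool.not_eq_true] at hM
        by_cases hP : PySem.Str.startswith t "super_" = true
        · have hC := pv_excl "super_" "control_" t (by decide) hP
          have hI := pv_excl "super_" "iso_" t (by decide) hP
          have hS := pv_excl "super_" "shift_" t (by decide) hP
          have hA := pv_excl "super_" "alt_" t (by decide) hP
          simp at hP hC hI hS hA
          simp [pvRest, pvCondW, pvCondC, hP, hC, hI, hS, hA, ht0]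
        · rw [Bool.not_eq_true] at hP
          simp at hW hM hP
          have hmem6 : (["win_l", "win_r", "meta_l", "meta_r", "super_l",
              "super_r"]).contains t = false := by
            cases h : (["win_l", "win_r", "meta_l", "meta_r", "super_l",
                "super_r"]).contains t
            · rfl
            · have := pv_mem6_startswith t h
              simp [hW, hM, hP] at this
          simp only [pvRest, pvCondW, pvCondC]
          simp at hmem6
          split_ifs <;> simp_all <;> decide

lemma pv_key_ctrl (k : String) :
    ((pvG k).map (fun c => PySem.Str.startswith c "control_")).getD false =
      pvCondC (pvKey k) := by
  unfold pvG
  rw [pv_normalize]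
  by_cases h : PySem.Str.lower (PySem.Str.strip k) = ""
  · have hk : pvKey k = "" := by unfold pvKey; rw [h]; rfl
    rw [if_pos h, hk]
    decide
  · rw [if_neg h]
    exact pv_core_ctrl (pvKey k)

lemma pv_key_shift (k : String) :
    ((pvG k).map (fun c => PySem.Str.startswith c "shift_")).getD false =
      pvCondS (pvKey k) := by
  unfold pvG
  rw [pv_normalize]
  by_cases h : PySem.Str.lower (PySem.Str.strip k) = ""
  · have hk : pvKey k = "" := by unfold pvKey; rw [h]; rfl
    rw [if_pos h, hk]
    decide
  · rw [if_neg h]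
    exact pv_core_shift (pvKey k)

lemma pv_key_alt (k : String) :
    ((pvG k).map (fun c => PySem.Str.startswith c "alt_")).getD false =
      pvCondA (pvKey k) := by
  unfold pvG
  rw [pv_normalize]
  by_cases h : PySem.Str.lower (PySem.Str.strip k) = ""
  · have hk : pvKey k = "" := by unfold pvKey; rw [h]; rfl
    rw [if_pos h, hk]
    decide
  · rw [if_neg h]
    exact pv_core_alt (pvKey k)

lemma pv_key_win (k : String) :
    ((pvG k).map (fun c =>
        ["win_l", "win_r", "meta_l", "meta_r", "super_l", "super_r"].contains c ||
        PySem.Str.startswith c "win_" || PySem.Str.startswith c "meta_" ||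
        PySem.Str.startswith c "super_")).getD false = pvCondW (pvKey k) := by
  unfold pvG
  rw [pv_normalize]
  by_cases h : PySem.Str.lower (PySem.Str.strip k) = ""
  · have hk : pvKey k = "" := by unfold pvKey; rw [h]; rfl
    rw [if_pos h, hk]
    decide
  · rw [if_neg h]
    exact pv_core_win (pvKey k)

-- ---- loop shapes ----

lemma pv_foldA (held : List String) (acc : List String) :
    held.foldl (fun acc k =>
      match normalize_modifier_keysym_for_held k with
      | some n => if n = "" then acc else acc ++ [n]
      | none => acc) acc = acc ++ held.filterMap pvG := by
  induction held generalizing acc with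
  | nil => simp
  | cons x xs ih =>
    rw [List.foldl_cons, ih]
    cases h : normalize_modifier_keysym_for_held x with
    | none =>
      have hg : pvG x = none := by unfold pvG; rw [h]; rfl
      simp [hg]
    | some n =>
      by_cases hn : n = ""
      · have hg : pvG x = none := by unfold pvG; rw [h]; simp [hn]
        simp [hg, hn]
      · have hg : pvG x = some n := by unfold pvG; rw [h]; simp [hn]
        simp [hg, hn]

lemma pv_any_filterMap (p : String → Bool) (held : List String) :
    (held.filterMap pvG).any p = held.any (fun k => ((pvG k).map p).getD false) := by
  induction held with
  | nil => simp
  | cons x xs ih => cases h : pvG x <;> simp [h, ih]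

lemma pv_step_bool (c s a w C I K S A W M P : Bool) :
    (if C || (I && K) then ((true, s, a, w) : Bool × Bool × Bool × Bool)
     else if S then (c, true, a, w)
     else if A then (c, s, true, w)
     else if W || M || P then (c, s, a, true)
     else (c, s, a, w)) =
    (c || (C || (I && K)),
     s || (!(C || (I && K)) && S),
     a || (!(C || (I && K)) && !S && A),
     w || (!(C || (I && K)) && !S && !A && (W || M || P))) := by
  revert c s a w C I K S A W M P
  decide

lemma pv_stepB (st : Bool × Bool × Bool × Bool) (k : String) :
    pvStepB st k = (st.1 || pvCondC (pvKey k), st.2.1 || pvCondS (pvKey k),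
      st.2.2.1 || pvCondA (pvKey k), st.2.2.2 || pvCondW (pvKey k)) := by
  obtain ⟨c, s, a, w⟩ := st
  simp only [pvStepB, pvKey, pvCondC, pvCondS, pvCondA, pvCondW]
  exact pv_step_bool c s a w _ _ _ _ _ _ _ _

lemma pv_foldB (held : List String) (st : Bool × Bool × Bool × Bool) :
    held.foldl pvStepB st =
      (st.1 || held.any (fun k => pvCondC (pvKey k)),
       st.2.1 || held.any (fun k => pvCondS (pvKey k)),
       st.2.2.1 || held.any (fun k => pvCondA (pvKey k)),
       st.2.2.2 || held.any (fun k => pvCondW (pvKey k))) := by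
  induction held generalizing st with
  | nil => simp
  | cons x xs ih =>
    rw [List.foldl_cons, pv_stepB, ih]
    simp [Bool.or_assoc]

lemma pv_out (c s a w : Bool) :
    (let out : List String := [];
     let out := if c then out ++ ["<ctrl>"] else out;
     let out := if s then out ++ ["<shift>"] else out;
     let out := if a then out ++ ["<alt>"] else out;
     let out := if w then out ++ ["<win>"] else out;
     out) =
      (if c then ["<ctrl>"] else []) ++ (if s then ["<shift>"] else []) ++
      (if a then ["<alt>"] else []) ++ (if w then ["<win>"] else []) := by
  cases c <;> cases s <;> cases a <;> cases w <;> rfl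

-- ===== VERDICT (by name: the statement is the Claim_ definition above) =====
theorem tk_held_keysyms_to_modifier_tokens_spec : Claim_equal_tk_held_keysyms_to_modifier_tokens := by
  intro held _
  unfold Spec_tk_held_keysyms_to_modifier_tokens
  unfold tk_held_keysyms_to_modifier_tokens tk_held_keysyms_to_modifier_tokens_alt
  rw [pv_foldA, pv_foldB]
  simp only [List.nil_append, Bool.false_or]
  rw [pv_any_filterMap, pv_any_filterMap, pv_any_filterMap, pv_any_filterMap]
  simp only [pv_key_ctrl, pv_key_shift, pv_key_alt, pv_key_win]
  exact pv_out _ _ _ _
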